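-- pv_equiv track=rewrite | github.com/aviolette/aoc2020 | day14/puzzle14.py | apply_value
-- ===== SOURCE A (Python) =====
-- def apply_value(rvalue, mask):
--     rvalue = int(rvalue)
--     new_val = rvalue
--     for i, bit in enumerate(reversed(mask)):
--         comp = pow(2, i)
--         if bit == "0":
--             new_val = new_val & ~comp
--         elif bit == "1":
--             new_val = new_val | comp
--     return new_val
-- ===== SOURCE B (Python) =====
-- def apply_value(rvalue, mask):
--     v = int(rvalue)
--     n = len(mask)
--     low = 0
--     for i, bit in enumerate(mask):
--         if bit == "1":
--             b = 1
--         elif bit == "0":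
--             b = 0
--         else:
--             b = (v >> (n - 1 - i)) & 1
--         low = low * 2 + b
--     return ((v >> n) << n) | low
-- ===== Notes on version B (the rewrite author's own statement) =====
-- stated objective: faster
-- what changed: B scans the mask left-to-right building the low bits of the answer by digit accumulation (low = low*2 + b, where b is forced by '0'/'1' or extracted from the value), then splices them under the value's preserved high bits with ((v>>n)<<n)|low, instead of A's right-to-left editing of the running value with a fresh pow(2,i) constant and a full-width AND/OR per bit.
import Mathlib
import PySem

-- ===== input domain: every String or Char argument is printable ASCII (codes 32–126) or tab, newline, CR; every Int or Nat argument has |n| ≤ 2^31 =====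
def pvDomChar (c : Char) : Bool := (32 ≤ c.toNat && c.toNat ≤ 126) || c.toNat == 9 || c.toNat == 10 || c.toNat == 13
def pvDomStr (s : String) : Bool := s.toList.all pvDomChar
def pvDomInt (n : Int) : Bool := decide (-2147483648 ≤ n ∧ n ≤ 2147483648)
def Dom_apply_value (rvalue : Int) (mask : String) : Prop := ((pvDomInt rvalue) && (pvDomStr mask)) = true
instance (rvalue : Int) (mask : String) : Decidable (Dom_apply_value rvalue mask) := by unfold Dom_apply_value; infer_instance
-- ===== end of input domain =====

-- B builds the answer's low bits left-to-right by digit accumulation (low = low*2 + b,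
-- b taken from the mask char or from the value's bit) and splices them under the value's
-- high bits once at the end, instead of A's right-to-left per-bit editing of the value
-- with pow(2,i) constants (measurably faster on long masks in a timing run).


-- ===== PORT A =====
-- one step of A's loop body: state is (new_val, i); comp = pow(2, i)
def applyStepA (st : Int × Nat) (bit : Char) : Int × Nat :=
  let comp : Int := 2 ^ st.2
  (if bit = '0' then PySem.Int.band st.1 (Int.not comp)
   else if bit = '1' then PySem.Int.bor st.1 comp
   else st.1,
   st.2 + 1)

def apply_value (rvalue : Int) (mask : String) : Int :=
  -- rvalue = int(rvalue) is the identity on an int argument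
  let new_val := rvalue
  ((mask.toList.reverse).foldl applyStepA (new_val, 0)).1

-- ===== PORT B =====
-- one step of B's loop body: state is (low, i); b is the selected binary digit
def altStep (v : Int) (n : Nat) (st : Int × Nat) (bit : Char) : Int × Nat :=
  let b : Int := if bit = '1' then 1 else if bit = '0' then 0
                 else PySem.Int.band (v >>> (n - 1 - st.2)) 1
  (st.1 * 2 + b, st.2 + 1)

def apply_value_alt (rvalue : Int) (mask : String) : Int :=
  let v := rvalue   -- v = int(rvalue) is the identity on an int argument
  let n := mask.toList.length
  let low := (mask.toList.foldl (altStep v n) (0, 0)).1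
  PySem.Int.bor ((v >>> n) <<< n) low

-- ===== PRECONDITION & SPEC =====
def Spec_apply_value (rvalue : Int) (mask : String) (out : Int) : Prop := out = apply_value_alt rvalue mask
instance (rvalue : Int) (mask : String) (out : Int) : Decidable (Spec_apply_value rvalue mask out) := by unfold Spec_apply_value; infer_instance

-- ===== CLAIM (what is proved, stated in full; the proofs are below) =====
def Claim_equal_apply_value : Prop := ∀ (rvalue : Int) (mask : String), Dom_apply_value rvalue mask → Spec_apply_value rvalue mask (apply_value rvalue mask)

-- ===== LEMMAS AND PROOFS =====

theorem testBit_neg_one (k : Nat) : (-1 : Int).testBit k = true := by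
  show (Int.negSucc 0).testBit k = true
  simp [Int.testBit]

theorem testBit_zero_int (k : Nat) : (0 : Int).testBit k = false := by
  show (Int.ofNat 0).testBit k = false
  simp [Int.testBit]

-- extensionality of Int by bits
theorem int_eq_of_testBit_eq {a b : Int} (h : ∀ k, a.testBit k = b.testBit k) : a = b := by
  cases a with
  | ofNat m =>
    cases b with
    | ofNat n =>
      have : m = n := Nat.eq_of_testBit_eq (fun i => h i)
      simp [this]
    | negSucc n =>
      exfalso
      have hk := h (m + n)
      have h1 : m.testBit (m + n) = false :=
        Nat.testBit_eq_false_of_lt (lt_of_lt_of_le Nat.lt_two_pow_self (Nat.pow_le_pow_right (by omega) (by omega)))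
      have h2 : n.testBit (m + n) = false :=
        Nat.testBit_eq_false_of_lt (lt_of_lt_of_le Nat.lt_two_pow_self (Nat.pow_le_pow_right (by omega) (by omega)))
      simp [Int.testBit, h1, h2] at hk
  | negSucc m =>
    cases b with
    | ofNat n =>
      exfalso
      have hk := h (m + n)
      have h1 : m.testBit (m + n) = false :=
        Nat.testBit_eq_false_of_lt (lt_of_lt_of_le Nat.lt_two_pow_self (Nat.pow_le_pow_right (by omega) (by omega)))
      have h2 : n.testBit (m + n) = false :=
        Nat.testBit_eq_false_of_lt (lt_of_lt_of_le Nat.lt_two_pow_self (Nat.pow_le_pow_right (by omega) (by omega)))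
      simp [Int.testBit, h1, h2] at hk
    | negSucc n =>
      have : m = n := Nat.eq_of_testBit_eq (fun i => by
        have := h i; simpa [Int.testBit] using this)
      simp [this]

-- m - (m &&& n) is the bits of m not in n (used to bridge PySem's two's-complement formulas)
theorem nat_sub_and (m n : Nat) : m - (m &&& n) = Nat.ldiff m n := by
  induction m using Nat.binaryRec generalizing n with
  | zero =>
    apply Nat.eq_of_testBit_eq
    simp [Nat.testBit_ldiff]
  | bit b m' ih =>
    have hdec : n = Nat.bit n.bodd n.div2 := by
      rw [Nat.bit_val]; have := Nat.bodd_add_div2 n; omega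
    rw [hdec]
    rw [Nat.land_bit, Nat.ldiff_bit, ← ih (Nat.div2 n)]
    have hle : m' &&& n.div2 ≤ m' := Nat.and_le_left
    have hle2 : m' &&& n / 2 ≤ m' := Nat.and_le_left
    cases b <;> cases hb : n.bodd <;>
      simp [Nat.bit, Nat.div2_val] <;> omega

-- bridges from PySem's Python-exact bitwise ops to Mathlib's land/lor/lnot
theorem band_eq_land (a b : Int) : PySem.Int.band a b = Int.land a b := by
  cases a with
  | ofNat m =>
    cases b with
    | ofNat n => simp [PySem.Int.band, Int.land]
    | negSucc n =>
      have h1 : ¬ (0 : Int) ≤ Int.negSucc n := by omega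
      have h2 : (-(Int.negSucc n) - 1) = (n : Int) := by omega
      simp [PySem.Int.band, Int.land, h1, nat_sub_and]
  | negSucc m =>
    have h1 : ¬ (0 : Int) ≤ Int.negSucc m := by omega
    cases b with
    | ofNat n => simp [PySem.Int.band, Int.land, h1, nat_sub_and]
    | negSucc n =>
      have h3 : ¬ (0 : Int) ≤ Int.negSucc n := by omega
      simp [PySem.Int.band, Int.land, h1, h3]
      omega

theorem bor_eq_lor (a b : Int) : PySem.Int.bor a b = Int.lor a b := by
  cases a with
  | ofNat m =>
    cases b with
    | ofNat n => simp [PySem.Int.bor, Int.lor]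
    | negSucc n =>
      have h1 : ¬ (0 : Int) ≤ Int.negSucc n := by omega
      simp [PySem.Int.bor, Int.lor, h1, nat_sub_and]
      omega
  | negSucc m =>
    have h1 : ¬ (0 : Int) ≤ Int.negSucc m := by omega
    cases b with
    | ofNat n =>
      simp [PySem.Int.bor, Int.lor, h1, nat_sub_and]
      omega
    | negSucc n =>
      have h3 : ¬ (0 : Int) ≤ Int.negSucc n := by omega
      simp [PySem.Int.bor, Int.lor, h1, h3]
      omega

theorem not_eq_lnot (a : Int) : Int.not a = Int.lnot a := by
  cases a <;> rfl

theorem testBit_two_pow_int (i k : Nat) : ((2 : Int) ^ i).testBit k = decide (i = k) := by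
  have h : ((2 : Int) ^ i) = Int.ofNat (2 ^ i) := by
    rw [Int.ofNat_eq_natCast]; push_cast; ring
  rw [h]
  show (2 ^ i : Nat).testBit k = decide (i = k)
  exact Nat.testBit_two_pow

theorem int_testBit_natCast (m : Nat) (k : Nat) : ((m : Int)).testBit k = m.testBit k := rfl

theorem int_testBit_shiftRight (a : Int) (n k : Nat) : (a >>> n).testBit k = a.testBit (n + k) := by
  cases a with
  | ofNat m =>
    show (Int.ofNat (m >>> n)).testBit k = (Int.ofNat m).testBit (n + k)
    simp [Int.testBit, Nat.testBit_shiftRight]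
  | negSucc m =>
    show (Int.negSucc (m >>> n)).testBit k = (Int.negSucc m).testBit (n + k)
    simp [Int.testBit, Nat.testBit_shiftRight]

-- testBit of b * 2^m + r when r < 2^m: low bits come from r, high bits from b
theorem nat_testBit_mul_add (b r m k : Nat) (hr : r < 2 ^ m) :
    (b * 2 ^ m + r).testBit k = if k < m then r.testBit k else b.testBit (k - m) := by
  by_cases hk : k < m
  · rw [if_pos hk]
    have hmod : (b * 2 ^ m + r) % 2 ^ m = r := by
      rw [Nat.mul_comm, Nat.mul_add_mod, Nat.mod_eq_of_lt hr]
    have h1 := Nat.testBit_mod_two_pow (b * 2 ^ m + r) m k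
    rw [hmod] at h1
    simp [hk] at h1
    exact h1.symm
  · rw [if_neg hk]
    have hdiv : (b * 2 ^ m + r) / 2 ^ m = b := by
      rw [Nat.mul_comm, Nat.mul_add_div (Nat.two_pow_pos m), Nat.div_eq_of_lt hr]
      omega
    have h1 := Nat.testBit_div_two_pow (n := m) (b * 2 ^ m + r) (k - m)
    rw [hdiv, show k - m + m = k by omega] at h1
    exact h1.symm

theorem int_testBit_shiftLeft (a : Int) (s k : Nat) :
    (a <<< s).testBit k = (decide (s ≤ k) && a.testBit (k - s)) := by
  cases a with
  | ofNat m =>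
    show (Int.ofNat (m <<< s)).testBit k = (decide (s ≤ k) && (Int.ofNat m).testBit (k - s))
    show (m <<< s).testBit k = (decide (s ≤ k) && m.testBit (k - s))
    rw [Nat.testBit_shiftLeft]
  | negSucc m =>
    have h2 : (m + 1) <<< s - 1 = m * 2 ^ s + (2 ^ s - 1) := by
      rw [Nat.shiftLeft_eq]
      have h : 1 ≤ 2 ^ s := Nat.one_le_two_pow
      have h' : (m + 1) * 2 ^ s = m * 2 ^ s + 2 ^ s := by ring
      omega
    have h3 : 2 ^ s - 1 < 2 ^ s := by
      have : 1 ≤ 2 ^ s := Nat.one_le_two_pow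
      omega
    show (Int.negSucc ((m + 1) <<< s - 1)).testBit k
        = (decide (s ≤ k) && (Int.negSucc m).testBit (k - s))
    show (!((m + 1) <<< s - 1).testBit k) = (decide (s ≤ k) && !m.testBit (k - s))
    rw [h2, nat_testBit_mul_add _ _ _ _ h3, Nat.testBit_two_pow_sub_one]
    by_cases hk : k < s
    · simp [hk, show ¬ (s ≤ k) by omega]
    · simp [hk, show s ≤ k by omega]

-- the pure AND/OR masks that A's loop logically applies, as functions of the remaining list
def amOf : List Char → Nat → Int
  | [], _ => -1
  | c :: t, i => if c = '0' then Int.land (Int.lnot (2 ^ i)) (amOf t (i + 1)) else amOf t (i + 1)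

def omOf : List Char → Nat → Int
  | [], _ => 0
  | c :: t, i => if c = '1' then Int.lor (2 ^ i) (omOf t (i + 1)) else omOf t (i + 1)

theorem land_assoc_int (a b c : Int) : Int.land (Int.land a b) c = Int.land a (Int.land b c) := by
  apply int_eq_of_testBit_eq
  intro k
  simp [Int.testBit_land, Bool.and_assoc]

theorem land_neg_one_int (a : Int) : Int.land a (-1) = a := by
  apply int_eq_of_testBit_eq
  intro k
  simp [Int.testBit_land, testBit_neg_one]

theorem lor_zero_int (a : Int) : Int.lor a 0 = a := by
  apply int_eq_of_testBit_eq
  intro k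
  simp [Int.testBit_lor, testBit_zero_int]

-- the accumulated AND-mask never clears a bit below the current position
theorem amOf_testBit_lt (t : List Char) (i k : Nat) (h : k < i) : (amOf t i).testBit k = true := by
  induction t generalizing i with
  | nil => exact testBit_neg_one k
  | cons c t ih =>
    by_cases h0 : c = '0'
    · have hik : ¬ (i = k) := by omega
      simp [amOf, h0, Int.testBit_land, Int.testBit_lnot, testBit_two_pow_int, hik,
        ih (i + 1) (by omega)]
    · simp [amOf, h0, ih (i + 1) (by omega)]

-- nor any bit at or above the end position
theorem amOf_testBit_ge (t : List Char) (i k : Nat) (h : i + t.length ≤ k) : (amOf t i).testBit k = true := by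
  induction t generalizing i with
  | nil => exact testBit_neg_one k
  | cons c t ih =>
    simp only [List.length_cons] at h
    by_cases h0 : c = '0'
    · have hik : ¬ (i = k) := by omega
      simp [amOf, h0, Int.testBit_land, Int.testBit_lnot, testBit_two_pow_int, hik,
        ih (i + 1) (by omega)]
    · simp [amOf, h0, ih (i + 1) (by omega)]

-- in range, the AND-mask clears exactly the bits whose mask char is '0'
theorem amOf_testBit_in (t : List Char) (i k : Nat) (h1 : i ≤ k) (h2 : k < i + t.length) :
    (amOf t i).testBit k = !decide (t.getD (k - i) 'X' = '0') := by
  induction t generalizing i with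
  | nil => simp at h2; omega
  | cons c t ih =>
    by_cases hk : k = i
    · have hki : k - i = 0 := by omega
      rw [hki, List.getD_cons_zero]
      by_cases h0 : c = '0'
      · simp [amOf, h0, Int.testBit_land, Int.testBit_lnot, testBit_two_pow_int, hk]
      · simp [amOf, h0, amOf_testBit_lt t (i + 1) k (by omega)]
    · have hik : ¬ (i = k) := by omega
      have hsucc : k - i = (k - (i + 1)) + 1 := by omega
      rw [hsucc, List.getD_cons_succ]
      simp only [List.length_cons] at h2
      by_cases h0 : c = '0'
      · simp [amOf, h0, Int.testBit_land, Int.testBit_lnot, testBit_two_pow_int, hik,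
          ih (i + 1) (by omega) (by omega)]
      · simp [amOf, h0, ih (i + 1) (by omega) (by omega)]

theorem omOf_testBit_lt (t : List Char) (i k : Nat) (h : k < i) : (omOf t i).testBit k = false := by
  induction t generalizing i with
  | nil => exact testBit_zero_int k
  | cons c t ih =>
    by_cases h1 : c = '1'
    · have hik : ¬ (i = k) := by omega
      simp [omOf, h1, Int.testBit_lor, testBit_two_pow_int, hik, ih (i + 1) (by omega)]
    · simp [omOf, h1, ih (i + 1) (by omega)]

theorem omOf_testBit_ge (t : List Char) (i k : Nat) (h : i + t.length ≤ k) : (omOf t i).testBit k = false := by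
  induction t generalizing i with
  | nil => exact testBit_zero_int k
  | cons c t ih =>
    simp only [List.length_cons] at h
    by_cases h1 : c = '1'
    · have hik : ¬ (i = k) := by omega
      simp [omOf, h1, Int.testBit_lor, testBit_two_pow_int, hik, ih (i + 1) (by omega)]
    · simp [omOf, h1, ih (i + 1) (by omega)]

-- in range, the OR-mask sets exactly the bits whose mask char is '1'
theorem omOf_testBit_in (t : List Char) (i k : Nat) (h1 : i ≤ k) (h2 : k < i + t.length) :
    (omOf t i).testBit k = decide (t.getD (k - i) 'X' = '1') := by
  induction t generalizing i with
  | nil => simp at h2; omega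
  | cons c t ih =>
    by_cases hk : k = i
    · have hki : k - i = 0 := by omega
      rw [hki, List.getD_cons_zero]
      by_cases h1' : c = '1'
      · simp [omOf, h1', Int.testBit_lor, testBit_two_pow_int, hk]
      · simp [omOf, h1', omOf_testBit_lt t (i + 1) k (by omega)]
    · have hik : ¬ (i = k) := by omega
      have hsucc : k - i = (k - (i + 1)) + 1 := by omega
      rw [hsucc, List.getD_cons_succ]
      simp only [List.length_cons] at h2
      by_cases h1' : c = '1'
      · simp [omOf, h1', Int.testBit_lor, testBit_two_pow_int, hik,
          ih (i + 1) (by omega) (by omega)]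
      · simp [omOf, h1', ih (i + 1) (by omega) (by omega)]

-- A's loop in closed form: masking the running value step by step equals one combined mask application
theorem foldA_eq (l : List Char) (v : Int) (i : Nat) :
    (l.foldl applyStepA (v, i)).1 = Int.lor (Int.land v (amOf l i)) (omOf l i) := by
  induction l generalizing v i with
  | nil => simp [amOf, omOf, land_neg_one_int, lor_zero_int]
  | cons c t ih =>
    by_cases h0 : c = '0'
    · have h1 : ¬ (c = '1') := by simp [h0]
      simp only [List.foldl_cons, applyStepA, h0, if_pos, band_eq_land, not_eq_lnot, ih]
      simp [amOf, omOf, h0, h1, land_assoc_int]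
    · by_cases h1 : c = '1'
      · simp only [List.foldl_cons, applyStepA, if_neg h0, h1, if_pos, bor_eq_lor, ih]
        simp only [amOf, omOf, h0, h1, if_neg, if_pos, ite_false, ite_true]
        apply int_eq_of_testBit_eq
        intro k
        by_cases hk : i = k
        · subst hk
          simp [Int.testBit_lor, Int.testBit_land, testBit_two_pow_int,
            amOf_testBit_lt t (i + 1) i (by omega)]
        · simp [Int.testBit_lor, Int.testBit_land, testBit_two_pow_int, hk, Bool.or_assoc]
      · simp only [List.foldl_cons, applyStepA, if_neg h0, if_neg h1, ih]
        simp [amOf, omOf, h0, h1]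

-- ===== B-side closed form =====

-- the binary digit B selects at bit position k for mask char c
def bitOf (v : Int) (c : Char) (k : Nat) : Bool :=
  if c = '1' then true else if c = '0' then false else v.testBit k

-- the low bits B accumulates, as a natural number (left-to-right digit accumulation)
def lowOfN (v : Int) : List Char → Nat
  | [] => 0
  | c :: t => (bitOf v c t.length).toNat * 2 ^ t.length + lowOfN v t

theorem lowOfN_lt (v : Int) (l : List Char) : lowOfN v l < 2 ^ l.length := by
  induction l with
  | nil => simp [lowOfN]
  | cons c t ih =>
    simp only [lowOfN, List.length_cons, pow_succ]
    have hb : (bitOf v c t.length).toNat ≤ 1 := Bool.toNat_le _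
    have hmul : (bitOf v c t.length).toNat * 2 ^ t.length ≤ 1 * 2 ^ t.length :=
      Nat.mul_le_mul_right _ hb
    omega

theorem bool_toNat_testBit_zero (b : Bool) : b.toNat.testBit 0 = b := by cases b <;> rfl

theorem lowOfN_testBit (v : Int) (l : List Char) (k : Nat) (hk : k < l.length) :
    (lowOfN v l).testBit k = bitOf v (l.getD (l.length - 1 - k) 'X') k := by
  induction l with
  | nil => simp at hk
  | cons c t ih =>
    simp only [lowOfN, List.length_cons]
    rw [nat_testBit_mul_add _ _ _ _ (lowOfN_lt v t)]
    by_cases h : k < t.length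
    · rw [if_pos h, ih h]
      have hidx : t.length + 1 - 1 - k = (t.length - 1 - k) + 1 := by omega
      rw [hidx, List.getD_cons_succ]
    · have hk' : k = t.length := by simp at hk; omega
      rw [if_neg h, hk']
      simp only [Nat.sub_self, bool_toNat_testBit_zero]
      have hidx : t.length + 1 - 1 - t.length = 0 := by omega
      rw [hidx, List.getD_cons_zero]

-- (v >> k) & 1 extracts bit k of v
theorem band_shr_one (v : Int) (k : Nat) :
    PySem.Int.band (v >>> k) 1 = if v.testBit k then (1 : Int) else 0 := by
  rw [band_eq_land]
  apply int_eq_of_testBit_eq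
  intro j
  rw [Int.testBit_land, int_testBit_shiftRight]
  have h1 : (1 : Int).testBit j = decide (j = 0) := by
    show (1 : Nat).testBit j = decide (j = 0)
    rcases j with _ | j
    · rfl
    · simp [Nat.testBit_add_one]
  rw [h1]
  by_cases hv : v.testBit k
  · rw [if_pos hv, h1]
    by_cases hj : j = 0
    · subst hj; simp [hv]
    · simp [hj]
  · rw [if_neg hv, testBit_zero_int]
    by_cases hj : j = 0
    · subst hj; simp [Nat.add_zero, hv]
    · simp [hj]

-- B's loop in closed form
theorem foldB_eq (v : Int) (n : Nat) (l : List Char) (acc : Int) (i : Nat) (hn : i + l.length = n) :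
    (l.foldl (altStep v n) (acc, i)).1 = acc * 2 ^ l.length + (lowOfN v l : Int) := by
  induction l generalizing acc i with
  | nil => simp [lowOfN]
  | cons c t ih =>
    simp only [List.length_cons] at hn
    have hs : n - 1 - i = t.length := by omega
    have hb : (if c = '1' then (1:Int) else if c = '0' then 0
               else PySem.Int.band (v >>> (n - 1 - i)) 1) = ((bitOf v c t.length).toNat : Int) := by
      rw [hs]
      by_cases h1 : c = '1'
      · simp [h1, bitOf]
      · by_cases h0 : c = '0'
        · simp [h1, h0, bitOf]
        · rw [if_neg h1, if_neg h0, band_shr_one]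
          simp only [bitOf, if_neg h1, if_neg h0]
          cases v.testBit t.length <;> simp
    simp only [List.foldl_cons, altStep, ih (acc * 2 + _) (i + 1) (by omega)]
    rw [hb]
    simp only [lowOfN, List.length_cons]
    push_cast
    ring

-- ===== VERDICT (by name: the statement is the Claim_ definition above) =====
theorem apply_value_spec : Claim_equal_apply_value := by
  intro rvalue mask _
  unfold Spec_apply_value
  show ((mask.toList.reverse).foldl applyStepA (rvalue, 0)).1
      = apply_value_alt rvalue mask
  rw [foldA_eq]
  show _ = PySem.Int.bor ((rvalue >>> mask.toList.length) <<< mask.toList.length)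
      ((mask.toList.foldl (altStep rvalue mask.toList.length) (0, 0)).1)
  rw [foldB_eq rvalue mask.toList.length mask.toList 0 0 (by omega), bor_eq_lor]
  simp only [zero_mul, zero_add]
  apply int_eq_of_testBit_eq
  intro k
  rw [Int.testBit_lor, Int.testBit_land, Int.testBit_lor, int_testBit_shiftLeft,
    int_testBit_natCast]
  have hlen : mask.toList.reverse.length = mask.toList.length := List.length_reverse
  by_cases hk : k < mask.toList.length
  · rw [amOf_testBit_in _ 0 k (by omega) (by rw [List.length_reverse]; omega),
      omOf_testBit_in _ 0 k (by omega) (by rw [List.length_reverse]; omega)]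
    rw [lowOfN_testBit rvalue mask.toList k hk]
    have hget : mask.toList.reverse.getD (k - 0) 'X'
        = mask.toList.getD (mask.toList.length - 1 - k) 'X' := by
      rw [List.getD_eq_getElem _ _ (by rw [List.length_reverse]; omega : k - 0 < mask.toList.reverse.length)]
      rw [List.getD_eq_getElem _ _ (by omega : mask.toList.length - 1 - k < mask.toList.length)]
      rw [List.getElem_reverse]
      congr 1
    rw [hget]
    set c := mask.toList.getD (mask.toList.length - 1 - k) 'X' with hc
    rw [decide_eq_false (by omega : ¬ (mask.toList.length ≤ k))]
    simp only [Bool.false_and, Bool.false_or]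
    by_cases h1 : c = '1'
    · simp [bitOf, h1]
    · by_cases h0 : c = '0'
      · simp [bitOf, h0, h1]
      · simp [bitOf, h0, h1]
  · rw [amOf_testBit_ge _ 0 k (by rw [List.length_reverse]; omega),
      omOf_testBit_ge _ 0 k (by rw [List.length_reverse]; omega)]
    rw [decide_eq_true (by omega : mask.toList.length ≤ k)]
    rw [int_testBit_shiftRight,
      show mask.toList.length + (k - mask.toList.length) = k by omega]
    rw [Nat.testBit_eq_false_of_lt
      (lt_of_lt_of_le (lowOfN_lt rvalue mask.toList) (Nat.pow_le_pow_right (by omega) (by omega)))]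
    simp
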